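-- pv_equiv track=rewrite | github.com/MathewMarchiano/Anomaly-Detection | AnomalyDetection/TernaryOperations.py | removeMarkedClasses
-- ===== SOURCE A (Python) =====
-- def removeMarkedClasses(data, labels, ternarySymbol):
--     '''
--     If a class is marked with a ternary symbol, this method will remove the class's respective label and data
--     from being used for training.
--
--     NOTE: The labels being passed to this method should be the total amount of RELABELED labels (i.e. if there
--     are 500 samples of data, there should be 500 labels that are either -1, 1, or 0.
--
--     :param data: Data being used to train the classifiers.
--     :param labels: "Ternerized" labels (-1, 1, or 0) being used for training a particular classifier.
--     :return: Updated data and labels without marked classes' data or labels.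
--     '''
--     indicesToDelete = []
--     index = 0
--
--     # Find indices of samples that are marked with the ternary symbol
--     for label in labels:
--         if label == ternarySymbol:
--             indicesToDelete.append(index)
--         index += 1
--
--     # Delete indices from data and labels. Convert back to list (from np array) afterwards.
--     sortedIndicies = sorted(indicesToDelete, reverse=True)
--     for index in sortedIndicies:
--         del data[index]
--         del labels[index]
--
--     return data, labels
-- ===== SOURCE B (Python) =====
-- def removeMarkedClasses(data, labels, ternarySymbol):
--     n = len(labels)
--     write = 0
--     for read in range(n):
--         if labels[read] != ternarySymbol:
--             data[write] = data[read]
--             labels[write] = labels[read]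
--             write += 1
--     del data[write:n]
--     del labels[write:]
--     return data, labels
-- ===== Notes on version B (the rewrite author's own statement) =====
-- stated objective: alternative
-- what changed: B replaces A's collect-matching-indices / reverse-sort / descending-delete passes by a single in-place two-pointer compaction (write cursor overwrites kept elements, one final truncation).
-- outside the precondition, e.g. on removeMarkedClasses([1], [5, 0], 5): A returns ([], [0]), B raises IndexError
import Mathlib
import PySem

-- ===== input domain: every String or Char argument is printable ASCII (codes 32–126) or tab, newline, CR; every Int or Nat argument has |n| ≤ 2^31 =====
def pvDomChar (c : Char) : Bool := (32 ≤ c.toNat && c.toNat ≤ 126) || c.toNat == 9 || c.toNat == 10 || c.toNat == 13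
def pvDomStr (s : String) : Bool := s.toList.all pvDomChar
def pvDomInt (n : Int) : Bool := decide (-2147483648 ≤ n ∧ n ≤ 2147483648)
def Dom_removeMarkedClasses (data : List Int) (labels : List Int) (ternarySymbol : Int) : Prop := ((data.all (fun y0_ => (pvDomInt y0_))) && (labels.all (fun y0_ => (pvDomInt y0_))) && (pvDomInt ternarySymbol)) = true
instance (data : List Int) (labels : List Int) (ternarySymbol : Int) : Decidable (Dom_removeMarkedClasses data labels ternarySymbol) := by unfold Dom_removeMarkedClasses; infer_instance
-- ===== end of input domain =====

-- B replaces A's collect-indices / reverse-sort / descending-delete by a single in-place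
-- two-pointer compaction; equivalence is about the RETURN value (both Pythons also mutate
-- data/labels in place, with the same final contents under Pre_).

-- ===== PORT A =====
-- del xs[i] with 0 ≤ i < len(xs) is List.eraseIdx; Pre_ keeps every deleted index in range.
def removeMarkedClasses (data : List Int) (labels : List Int) (ternarySymbol : Int) : List Int × List Int :=
  let p := labels.foldl (fun (p : List Nat × Nat) label =>
      if label = ternarySymbol then (p.1 ++ [p.2], p.2 + 1) else (p.1, p.2 + 1)) ([], 0)
  let sortedIndicies := PySem.List.sorted p.1 (fun i => i) true
  sortedIndicies.foldl (fun (dl : List Int × List Int) i => (dl.1.eraseIdx i, dl.2.eraseIdx i)) (data, labels)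

-- ===== PORT B =====
-- labels[read]/data[read] and the slice deletions are exact under Pre_ (indices in range);
-- del data[write:n] = take write ++ drop n, del labels[write:] = take write.
def removeMarkedClasses_alt (data : List Int) (labels : List Int) (ternarySymbol : Int) : List Int × List Int :=
  let n := labels.length
  let st := (List.range n).foldl (fun (s : List Int × List Int × Nat) read =>
      if s.2.1.getD read 0 ≠ ternarySymbol then
        (s.1.set s.2.2 (s.1.getD read 0), s.2.1.set s.2.2 (s.2.1.getD read 0), s.2.2 + 1)
      else s) (data, labels, 0)
  (st.1.take st.2.2 ++ st.1.drop n, st.2.1.take st.2.2)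

-- ===== PRECONDITION & SPEC =====
-- Pre_ excludes inputs with fewer data entries than labels: there A either raises IndexError on
-- 'del data[index]' or accidentally returns mismatched lists, and B itself raises IndexError.
def Pre_removeMarkedClasses (data : List Int) (labels : List Int) (ternarySymbol : Int) : Prop :=
  labels.length ≤ data.length
instance (data : List Int) (labels : List Int) (ternarySymbol : Int) : Decidable (Pre_removeMarkedClasses data labels ternarySymbol) := by unfold Pre_removeMarkedClasses; infer_instance
def pvWitness_removeMarkedClasses : List Int × List Int × Int := ([1, 2, 3], [0, 1, 0], 1)

def Spec_removeMarkedClasses (data : List Int) (labels : List Int) (ternarySymbol : Int) (out : List Int × List Int) : Prop := out = removeMarkedClasses_alt data labels ternarySymbol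
instance (data : List Int) (labels : List Int) (ternarySymbol : Int) (out : List Int × List Int) : Decidable (Spec_removeMarkedClasses data labels ternarySymbol out) := by unfold Spec_removeMarkedClasses; infer_instance

-- ===== CLAIM (what is proved, stated in full; the proofs are below) =====
def Claim_equal_removeMarkedClasses : Prop := ∀ (data : List Int) (labels : List Int) (ternarySymbol : Int), Dom_removeMarkedClasses data labels ternarySymbol → Pre_removeMarkedClasses data labels ternarySymbol → Spec_removeMarkedClasses data labels ternarySymbol (removeMarkedClasses data labels ternarySymbol)

-- ===== LEMMAS AND PROOFS =====

def idxs (t : Int) : List Int → List Nat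
  | [] => []
  | l :: ls => if l = t then 0 :: (idxs t ls).map (· + 1) else (idxs t ls).map (· + 1)

def delAll (xs : List Int) (I : List Nat) : List Int :=
  I.foldr (fun i acc => acc.eraseIdx i) xs

def fKeep (t : Int) : List Int → List Int → List Int
  | [], _ => []
  | _ :: _, [] => []
  | l :: ls, d :: ds => if l = t then fKeep t ls ds else d :: fKeep t ls ds

theorem collect_eq (t : Int) : ∀ (ls : List Int) (acc : List Nat) (k : Nat),
    ls.foldl (fun (p : List Nat × Nat) label =>
      if label = t then (p.1 ++ [p.2], p.2 + 1) else (p.1, p.2 + 1)) (acc, k)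
    = (acc ++ (idxs t ls).map (· + k), k + ls.length) := by
  intro ls
  induction ls with
  | nil => intro acc k; simp [idxs]
  | cons l ls ih =>
    intro acc k
    have hcomp : ((fun x => x + k) ∘ fun x : Nat => x + 1) = (fun x => x + (k + 1)) := by
      funext x; simp; omega
    by_cases h : l = t
    · rw [List.foldl_cons, if_pos h, ih]
      simp only [idxs, if_pos h, List.map_cons, List.map_map, hcomp]
      rw [Prod.mk.injEq]
      exact ⟨by simp [List.append_assoc], by simp [List.length_cons]; omega⟩
    · rw [List.foldl_cons, if_neg h, ih]
      simp only [idxs, if_neg h, List.map_map, hcomp]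
      rw [Prod.mk.injEq]
      exact ⟨rfl, by simp [List.length_cons]; omega⟩

theorem idxs_pairwise (t : Int) : ∀ ls : List Int, (idxs t ls).Pairwise (· < ·) := by
  intro ls
  induction ls with
  | nil => simp [idxs]
  | cons l ls ih =>
    have hm : ((idxs t ls).map (· + 1)).Pairwise (· < ·) := by
      rw [List.pairwise_map]; exact ih.imp (by omega)
    by_cases h : l = t
    · simp [idxs, h, hm]
    · simp [idxs, h, hm]

theorem delAll_shift : ∀ (I : List Nat) (d : Int) (ds : List Int),
    delAll (d :: ds) (I.map (· + 1)) = d :: delAll ds I := by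
  intro I
  induction I with
  | nil => intro d ds; simp [delAll]
  | cons i I ih =>
    intro d ds; simp only [delAll, List.map_cons, List.foldr_cons] at ih ⊢
    rw [ih, List.eraseIdx_cons_succ]

theorem delAll_idxs (t : Int) : ∀ (ls xs : List Int), ls.length ≤ xs.length →
    delAll xs (idxs t ls) = fKeep t ls xs ++ xs.drop ls.length := by
  intro ls
  induction ls with
  | nil => intro xs h; simp [idxs, delAll, fKeep]
  | cons l ls ih =>
    intro xs h
    match xs with
    | [] => simp at h
    | d :: ds =>
      simp at h
      by_cases hl : l = t
      · simp only [idxs, if_pos hl]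
        have : delAll (d :: ds) (0 :: (idxs t ls).map (· + 1))
            = (delAll (d :: ds) ((idxs t ls).map (· + 1))).eraseIdx 0 := by simp [delAll]
        rw [this, delAll_shift, List.eraseIdx_cons_zero, ih ds h]
        simp [fKeep, hl]
      · simp only [idxs, if_neg hl]
        rw [delAll_shift, ih ds h]
        simp [fKeep, hl]

theorem fKeep_self (t : Int) : ∀ ls : List Int, fKeep t ls ls = ls.filter (· ≠ t) := by
  intro ls
  induction ls with
  | nil => rfl
  | cons l ls ih =>
    by_cases h : l = t
    · simp [fKeep, h, ih]
    · simp [fKeep, h, ih]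

theorem foldl_pair_erase : ∀ (I : List Nat) (d l : List Int),
    I.foldl (fun (dl : List Int × List Int) i => (dl.1.eraseIdx i, dl.2.eraseIdx i)) (d, l)
    = (I.foldl (fun a i => a.eraseIdx i) d, I.foldl (fun a i => a.eraseIdx i) l) := by
  intro I
  induction I with
  | nil => intro d l; rfl
  | cons i I ih => intro d l; simp [List.foldl_cons, ih]



theorem take_succ_set (l : List Int) (w : Nat) (x : Int) (h : w < l.length) :
    (l.set w x).take (w+1) = l.take w ++ [x] := by
  rw [List.take_add_one]
  congr 1
  · ext i y; simp [List.getElem?_take, List.getElem?_set]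
    intro hi; simp [Nat.ne_of_gt hi]
  · simp [h]

theorem drop_set_of_lt (l : List Int) (w j : Nat) (x : Int) (h : w < j) :
    (l.set w x).drop j = l.drop j := by
  ext i y; simp [List.getElem?_drop, List.getElem?_set]
  rw [if_neg (by omega)]

theorem getD_of_drop_eq (l l' : List Int) (r : Nat) (hd : l.drop r = l'.drop r) :
    l.getD r 0 = l'.getD r 0 := by
  have h0 : (l.drop r)[0]? = (l'.drop r)[0]? := by rw [hd]
  simp only [List.getElem?_drop, Nat.add_zero] at h0
  simp [List.getD_eq_getElem?_getD, h0]

theorem fKeep_append (t : Int) : ∀ (a b : List Int) (x y : Int), a.length = b.length →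
    fKeep t (a ++ [x]) (b ++ [y]) = fKeep t a b ++ (if x = t then [] else [y]) := by
  intro a
  induction a with
  | nil => intro b x y h
           match b with
           | [] => by_cases hx : x = t <;> simp [fKeep, hx]
           | _ :: _ => simp at h
  | cons l a ih =>
    intro b x y h
    match b with
    | [] => simp at h
    | d :: b =>
      simp at h
      by_cases hl : l = t <;> simp [fKeep, hl, ih b x y h]

theorem fKeep_take (t : Int) : ∀ (ls ds : List Int), fKeep t ls (ds.take ls.length) = fKeep t ls ds := by
  intro ls
  induction ls with
  | nil => intro ds; rfl
  | cons l ls ih =>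
    intro ds
    match ds with
    | [] => rfl
    | d :: ds => by_cases hl : l = t <;> simp [fKeep, hl, ih ds]

def stepB (t : Int) (s : List Int × List Int × Nat) (read : Nat) : List Int × List Int × Nat :=
  if s.2.1.getD read 0 ≠ t then
    (s.1.set s.2.2 (s.1.getD read 0), s.2.1.set s.2.2 (s.2.1.getD read 0), s.2.2 + 1)
  else s

theorem B_inv (data labels : List Int) (t : Int) (h : labels.length ≤ data.length) :
    ∀ r : Nat, r ≤ labels.length →
    (let st := (List.range r).foldl (stepB t) (data, labels, 0)
     st.1.length = data.length ∧ st.2.1.length = labels.length ∧ st.2.2 ≤ r ∧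
     st.1.take st.2.2 = fKeep t (labels.take r) (data.take r) ∧
     st.2.1.take st.2.2 = (labels.take r).filter (· ≠ t) ∧
     st.1.drop r = data.drop r ∧ st.2.1.drop r = labels.drop r) := by
  intro r
  induction r with
  | zero => intro _; simp [fKeep]
  | succ r ih =>
    intro hr
    have hr' : r ≤ labels.length := by omega
    obtain ⟨h1, h2, h3, h4, h5, h6, h7⟩ := ih hr'
    rw [List.range_succ, List.foldl_append, List.foldl_cons, List.foldl_nil]
    set st := (List.range r).foldl (stepB t) (data, labels, 0) with hst
    have hrl : r < labels.length := by omega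
    have hrd : r < data.length := by omega
    have hrl' : r < st.2.1.length := by omega
    have hrd' : r < st.1.length := by omega
    have hwl : st.2.2 < st.2.1.length := by omega
    have hwd : st.2.2 < st.1.length := by omega
    have hgl : st.2.1.getD r 0 = labels.getD r 0 := getD_of_drop_eq _ _ r h7
    have hgd : st.1.getD r 0 = data.getD r 0 := getD_of_drop_eq _ _ r h6
    have hlr : labels.getD r 0 = labels[r] := List.getD_eq_getElem labels 0 hrl
    have hdr : data.getD r 0 = data[r] := List.getD_eq_getElem data 0 hrd
    have htl : labels.take (r+1) = labels.take r ++ [labels[r]] := by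
      rw [List.take_add_one]; simp [hrl]
    have htd : data.take (r+1) = data.take r ++ [data[r]] := by
      rw [List.take_add_one]; simp [hrd]
    have hlen : (labels.take r).length = (data.take r).length := by
      simp [List.length_take]; omega
    by_cases hc : labels[r] = t
    · -- skipped element
      have hstep : stepB t st r = st := by
        unfold stepB; rw [hgl, hlr, if_neg (not_not_intro hc)]
      rw [hstep]
      refine ⟨h1, h2, by omega, ?_, ?_, ?_, ?_⟩
      · rw [h4, htl, htd, fKeep_append t _ _ _ _ hlen, if_pos hc, List.append_nil]
      · rw [h5, htl, List.filter_append]; simp [hc]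
      · rw [← List.tail_drop, ← List.tail_drop, h6]
      · rw [← List.tail_drop, ← List.tail_drop, h7]
    · -- kept element
      have hstep : stepB t st r =
          (st.1.set st.2.2 data[r], st.2.1.set st.2.2 labels[r], st.2.2 + 1) := by
        unfold stepB; rw [hgl, hlr, hgd, hdr, if_pos hc]
      rw [hstep]
      refine ⟨?_, ?_, ?_, ?_, ?_, ?_, ?_⟩
      · show (st.1.set st.2.2 data[r]).length = data.length; simp [h1]
      · show (st.2.1.set st.2.2 labels[r]).length = labels.length; simp [h2]
      · show st.2.2 + 1 ≤ r + 1; omega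
      · show (st.1.set st.2.2 data[r]).take (st.2.2 + 1) = _
        rw [take_succ_set _ _ _ hwd, h4, htl, htd, fKeep_append t _ _ _ _ hlen, if_neg hc]
      · show (st.2.1.set st.2.2 labels[r]).take (st.2.2 + 1) = _
        rw [take_succ_set _ _ _ hwl, h5, htl, List.filter_append]; simp [hc]
      · show (st.1.set st.2.2 data[r]).drop (r + 1) = _
        rw [drop_set_of_lt _ _ _ _ (by omega), ← List.tail_drop, ← List.tail_drop, h6]
      · show (st.2.1.set st.2.2 labels[r]).drop (r + 1) = _
        rw [drop_set_of_lt _ _ _ _ (by omega), ← List.tail_drop, ← List.tail_drop, h7]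

theorem removeMarkedClasses_A_closed (data labels : List Int) (t : Int)
    (h : labels.length ≤ data.length) :
    removeMarkedClasses data labels t =
      (fKeep t labels data ++ data.drop labels.length, labels.filter (· ≠ t)) := by
  have hA : removeMarkedClasses data labels t =
      (PySem.List.sorted (labels.foldl (fun (p : List Nat × Nat) label =>
          if label = t then (p.1 ++ [p.2], p.2 + 1) else (p.1, p.2 + 1)) ([], 0)).1
        (fun i => i) true).foldl
        (fun (dl : List Int × List Int) i => (dl.1.eraseIdx i, dl.2.eraseIdx i)) (data, labels) := rfl
  rw [hA, collect_eq t labels [] 0]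
  simp only [List.nil_append]
  rw [show (idxs t labels).map (· + 0) = idxs t labels from by simp]
  rw [PySem.List.sorted_rev_eq_of_perm_of_pairwise_gt (idxs t labels) (idxs t labels).reverse
    (fun i => i) (List.reverse_perm _)
    (by rw [List.pairwise_reverse]; exact idxs_pairwise t labels)]
  rw [foldl_pair_erase, List.foldl_reverse, List.foldl_reverse]
  have hd : List.foldr (fun x y => y.eraseIdx x) data (idxs t labels) = delAll data (idxs t labels) := rfl
  have hl : List.foldr (fun x y => y.eraseIdx x) labels (idxs t labels) = delAll labels (idxs t labels) := rfl
  rw [hd, hl, delAll_idxs t labels data h, delAll_idxs t labels labels le_rfl, fKeep_self]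
  simp

theorem removeMarkedClasses_B_closed (data labels : List Int) (t : Int)
    (h : labels.length ≤ data.length) :
    removeMarkedClasses_alt data labels t =
      (fKeep t labels data ++ data.drop labels.length, labels.filter (· ≠ t)) := by
  obtain ⟨h1, h2, h3, h4, h5, h6, h7⟩ := B_inv data labels t h labels.length le_rfl
  have halt : removeMarkedClasses_alt data labels t =
      (let st := (List.range labels.length).foldl (stepB t) (data, labels, 0)
       (st.1.take st.2.2 ++ st.1.drop labels.length, st.2.1.take st.2.2)) := rfl
  rw [halt]
  simp only []
  rw [Prod.mk.injEq]
  constructor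
  · rw [h4, h6]; simp [fKeep_take]
  · rw [h5]; simp

-- ===== VERDICT (by name: the statement is the Claim_ definition above) =====
theorem removeMarkedClasses_spec : Claim_equal_removeMarkedClasses := by
  intro data labels t _ hpre
  unfold Spec_removeMarkedClasses
  rw [removeMarkedClasses_A_closed data labels t hpre,
      removeMarkedClasses_B_closed data labels t hpre]
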